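-- pv_equiv track=rewrite | github.com/reiniscirpons/freebandlib | src/freeband.py | pref_ltof
-- ===== SOURCE A (Python) =====
-- from typing import Callable, Dict, List, Optional, Set, Tuple
--
-- OutputLetter = int
--
-- OutputWord = List[OutputLetter]
--
-- def cont(word: OutputWord) -> Set[OutputLetter]:
--     """ Return the content of a word. """
--     return set(word)
--
-- def pref_ltof(word: OutputWord) -> Tuple[Optional[OutputWord],
--                                          Optional[OutputLetter]]:
--     """ Return the prefix and first to occur last letter of a word. """
--     k = len(cont(word))
--     j = 0
--     seen = set()
--     for i, letter in enumerate(word):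
--         if letter not in seen:
--             j += 1
--             if j == k:
--                 return word[:i], letter
--             seen.add(letter)
--     # Only happens if word is the empty word
--     return None, None
-- ===== SOURCE B (Python) =====
-- from typing import Dict, List, Optional, Tuple
--
-- OutputLetter = int
-- OutputWord = List[OutputLetter]
--
-- def pref_ltof(word: OutputWord) -> Tuple[Optional[OutputWord],
--                                          Optional[OutputLetter]]:
--     """ Return the prefix and first to occur last letter of a word. """
--     first: Dict[OutputLetter, int] = {}
--     for i, letter in enumerate(word):
--         if letter not in first:
--             first[letter] = i
--     if not first:
--         return None, None
--     letter, i = max(first.items(), key=lambda kv: kv[1])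
--     return word[:i], letter
-- ===== Notes on version B (the rewrite author's own statement) =====
-- stated objective: alternative
-- what changed: A precomputes k=len(set(word)) and scans counting new letters until the k-th appears; B never computes k: it builds a dict mapping each letter to its first-occurrence index in one pass and returns the slice at the argmax of those indices.
import Mathlib
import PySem

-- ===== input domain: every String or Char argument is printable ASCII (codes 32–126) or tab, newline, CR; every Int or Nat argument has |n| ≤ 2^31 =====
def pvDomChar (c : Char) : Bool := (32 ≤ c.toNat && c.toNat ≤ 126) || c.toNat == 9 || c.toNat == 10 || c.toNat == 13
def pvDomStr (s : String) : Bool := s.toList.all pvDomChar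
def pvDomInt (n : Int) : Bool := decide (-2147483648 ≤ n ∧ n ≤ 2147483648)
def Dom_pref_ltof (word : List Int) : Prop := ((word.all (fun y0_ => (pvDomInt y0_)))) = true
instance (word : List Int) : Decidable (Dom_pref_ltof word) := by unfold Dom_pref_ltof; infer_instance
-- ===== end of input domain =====

-- B replaces A's count-to-k early-return scan by a first-occurrence-index table plus an argmax over it (objective: alternative/simpler decomposition; no speed claim).

-- ===== PORT A =====
-- cont(word) = set(word)
def pvCont (word : List Int) : PySem.Set Int := PySem.Set.ofList word

-- A's 'for i, letter in enumerate(word)' loop, with its early return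
def pvALoop (word : List Int) (k : Int) : List (Int × Int) → Int → PySem.Set Int → Option (List Int) × Option Int
  | [], _, _ => (none, none)
  | (i, letter) :: rest, j, seen =>
    if PySem.Set.contains seen letter then
      pvALoop word k rest j seen
    else
      if j + 1 = k then (some (PySem.List.slice word none (some i)), some letter)
      else pvALoop word k rest (j + 1) (PySem.Set.add seen letter)

def pref_ltof (word : List Int) : Option (List Int) × Option Int :=
  pvALoop word (PySem.Set.len (pvCont word)) (PySem.List.enumerate word) 0 PySem.Set.empty

-- ===== PORT B =====
-- B's 'for i, letter in enumerate(word): if letter not in first: first[letter] = i'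
def pvFirstOcc (l : List (Int × Int)) (d : PySem.Dict Int Int) : PySem.Dict Int Int :=
  l.foldl (fun d p => if d.contains p.2 then d else d.insert p.2 p.1) d

def pref_ltof_alt (word : List Int) : Option (List Int) × Option Int :=
  let first := pvFirstOcc (PySem.List.enumerate word) PySem.Dict.empty
  match PySem.List.max? first.items (fun kv => kv.2) with
  | none => (none, none)
  | some (letter, i) => (some (PySem.List.slice word none (some i)), some letter)

-- ===== PRECONDITION & SPEC =====
def Spec_pref_ltof (word : List Int) (out : Option (List Int) × Option Int) : Prop := out = pref_ltof_alt word
instance (word : List Int) (out : Option (List Int) × Option Int) : Decidable (Spec_pref_ltof word out) := by unfold Spec_pref_ltof; infer_instance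

-- ===== CLAIM (what is proved, stated in full; the proofs are below) =====
def Claim_equal_pref_ltof : Prop := ∀ (word : List Int), Dom_pref_ltof word → Spec_pref_ltof word (pref_ltof word)

-- ===== LEMMAS AND PROOFS =====

-- the first-occurrence fold only appends items
theorem pvFirstOcc_prefix (l : List (Int × Int)) (d : PySem.Dict Int Int) :
    ∃ e, (pvFirstOcc l d).items = d.items ++ e := by
  induction l generalizing d with
  | nil => exact ⟨[], by simp [pvFirstOcc]⟩
  | cons p l ih =>
    have hstep : pvFirstOcc (p :: l) d
        = pvFirstOcc l (if d.contains p.2 then d else d.insert p.2 p.1) := rfl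
    by_cases h : d.contains p.2 = true
    · rw [hstep, if_pos h]; exact ih d
    · rw [hstep, if_neg h]
      obtain ⟨e, he⟩ := ih (d.insert p.2 p.1)
      refine ⟨(p.2, p.1) :: e, ?_⟩
      rw [he]
      simp [PySem.Dict.insert, h]

-- d.keys, viewed as the seen-set, answers membership like the dict
theorem pvKeysContains (d : PySem.Dict Int Int) (x : Int) :
    PySem.Set.contains (PySem.Dict.keys d) x = PySem.Dict.contains d x := by
  rw [Bool.eq_iff_iff]
  simp [PySem.Set.contains, PySem.Dict.keys, PySem.Dict.contains, List.any_eq_true]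

-- keys of the first-occurrence table = running seen-set
theorem pvKeysOfFold (l : List (Int × Int)) (d : PySem.Dict Int Int) :
    (pvFirstOcc l d).keys = PySem.Set.update (PySem.Dict.keys d) (l.map (·.2)) := by
  induction l generalizing d with
  | nil => simp [pvFirstOcc, PySem.Set.update]
  | cons p l ih =>
    have hstep : pvFirstOcc (p :: l) d
        = pvFirstOcc l (if d.contains p.2 then d else d.insert p.2 p.1) := rfl
    have hupd : PySem.Set.update (PySem.Dict.keys d) ((p :: l).map (·.2))
        = PySem.Set.update (PySem.Set.add (PySem.Dict.keys d) p.2) (l.map (·.2)) := rfl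
    by_cases h : d.contains p.2 = true
    · rw [hstep, if_pos h, hupd, ih]
      congr 1
      have hmem : p.2 ∈ PySem.Dict.keys d := by
        simp [PySem.Dict.contains] at h
        obtain ⟨a, ha⟩ := h
        exact List.mem_map_of_mem ha
      simp [PySem.Set.add, PySem.Set.contains, hmem]
    · rw [hstep, if_neg h, hupd, ih]
      congr 1
      have hno : ∀ x, (p.2, x) ∉ d.items := by simpa [PySem.Dict.contains] using h
      simp [PySem.Set.add, PySem.Set.contains, PySem.Dict.insert, h, PySem.Dict.keys]
      exact hno

-- the recorded first-occurrence indices are strictly increasing in insertion order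
theorem pvValuesIncreasing (xs : List Int) (s : Int) (d : PySem.Dict Int Int)
    (hbnd : ∀ v ∈ d.items.map (·.2), v < s)
    (hpw : (d.items.map (·.2)).Pairwise (· < ·)) :
    ((pvFirstOcc (PySem.List.enumerate xs s) d).items.map (·.2)).Pairwise (· < ·) := by
  induction xs generalizing s d with
  | nil => simpa [pvFirstOcc, PySem.List.enumerate] using hpw
  | cons x xs ih =>
    rw [PySem.List.enumerate_cons]
    have hstep : pvFirstOcc ((s, x) :: PySem.List.enumerate xs (s+1)) d
        = pvFirstOcc (PySem.List.enumerate xs (s+1)) (if d.contains x then d else d.insert x s) := rfl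
    rw [hstep]
    by_cases h : d.contains x = true
    · rw [if_pos h]
      exact ih (s+1) d (fun v hv => lt_trans (hbnd v hv) (by omega)) hpw
    · rw [if_neg h]
      have hitems : (d.insert x s).items = d.items ++ [(x, s)] := by
        simp [PySem.Dict.insert, h]
      apply ih (s+1)
      · intro v hv
        rw [hitems, List.map_append] at hv
        rcases List.mem_append.mp hv with hv | hv
        · exact lt_trans (hbnd v hv) (by omega)
        · simp at hv; omega
      · rw [hitems, List.map_append]
        rw [List.pairwise_append]
        refine ⟨hpw, by simp, ?_⟩
        intro a ha b hb
        simp at hb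
        exact hb ▸ hbnd a ha

-- a running max over a list whose keys strictly increase ends at the last element
theorem pvMaxAux (f : Option (Int × Int) → (Int × Int) → Option (Int × Int))
    (hf : ∀ m y, f (some m) y = if m.2 < y.2 then some y else some m)
    (l : List (Int × Int)) (m : Int × Int)
    (hall : ∀ y ∈ l, m.2 < y.2) (hpw : (l.map (·.2)).Pairwise (· < ·)) :
    l.foldl f (some m) = some (l.getLastD m) := by
  induction l generalizing m with
  | nil => rfl
  | cons y l ih =>
    rw [List.foldl_cons, hf, if_pos (hall y (by simp)), List.getLastD_cons]
    simp only [List.map_cons, List.pairwise_cons] at hpw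
    refine ih y ?_ hpw.2
    intro z hz
    exact hpw.1 z.2 (List.mem_map_of_mem hz)

-- argmax over strictly increasing values is the last item
theorem pvMaxLast (l : List (Int × Int)) (h : (l.map (·.2)).Pairwise (· < ·)) :
    PySem.List.max? l (fun kv => kv.2) = l.getLast? := by
  cases l with
  | nil => rfl
  | cons x t =>
    simp only [List.map_cons, List.pairwise_cons] at h
    rw [List.getLast?_cons, show (t.getLast?).getD x = t.getLastD x from (List.getLastD_eq_getLast?.symm ▸ rfl)]
    unfold PySem.List.max?
    rw [List.foldl_cons]
    exact pvMaxAux _ (fun m y => rfl) t x (fun y hy => h.1 y.2 (List.mem_map_of_mem hy)) h.2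

-- one unfolding of A's loop
theorem pvALoop_cons (word : List Int) (k i letter : Int) (rest : List (Int × Int)) (j : Int) (seen : PySem.Set Int) :
    pvALoop word k ((i, letter) :: rest) j seen
      = if PySem.Set.contains seen letter then pvALoop word k rest j seen
        else if j + 1 = k then (some (PySem.List.slice word none (some i)), some letter)
        else pvALoop word k rest (j + 1) (PySem.Set.add seen letter) := rfl

-- main correspondence: A's loop from a seen-state = argmax-as-last-item of B's table
theorem pvMain (word : List Int) (l : List (Int × Int)) (d : PySem.Dict Int Int)
    (hlt : d.size < (pvFirstOcc l d).size) :
    pvALoop word ((pvFirstOcc l d).size : Int) l (d.size : Int) (PySem.Dict.keys d)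
      = match (pvFirstOcc l d).items.getLast? with
        | none => (none, none)
        | some (letter, i) => (some (PySem.List.slice word none (some i)), some letter) := by
  induction l generalizing d with
  | nil => exact absurd hlt (by simp [pvFirstOcc])
  | cons p l ih =>
    obtain ⟨i, letter⟩ := p
    have hstep : pvFirstOcc ((i, letter) :: l) d
        = pvFirstOcc l (if d.contains letter then d else d.insert letter i) := rfl
    by_cases h : d.contains letter = true
    · rw [hstep, if_pos h] at hlt ⊢
      rw [pvALoop_cons, pvKeysContains, h, if_pos rfl]
      exact ih d hlt
    · rw [hstep, if_neg h] at hlt ⊢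
      have hf : PySem.Dict.contains d letter = false := by
        revert h; cases d.contains letter <;> simp
      have hitems : (d.insert letter i).items = d.items ++ [(letter, i)] := by
        simp [PySem.Dict.insert, h]
      obtain ⟨e, he⟩ := pvFirstOcc_prefix l (d.insert letter i)
      have hsize : (pvFirstOcc l (d.insert letter i)).size = d.size + 1 + e.length := by
        simp [PySem.Dict.size, he, hitems]; omega
      rw [pvALoop_cons, pvKeysContains, hf, if_neg (by simp)]
      by_cases he0 : e = []
      · subst he0
        rw [if_pos (by rw [hsize]; push_cast; simp)]
        have hfin : (pvFirstOcc l (d.insert letter i)).items = d.items ++ [(letter, i)] := by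
          simpa [hitems] using he
        rw [hfin]
        simp
      · have hel : 0 < e.length := List.length_pos_iff.mpr he0
        rw [if_neg (by rw [hsize]; push_cast; omega)]
        have hkeys : PySem.Set.add (PySem.Dict.keys d) letter = PySem.Dict.keys (d.insert letter i) := by
          simp [PySem.Set.add, PySem.Dict.keys, hitems]
          simpa [PySem.Dict.contains] using h
        have hj : (d.size : Int) + 1 = ((d.insert letter i).size : Int) := by
          simp [PySem.Dict.size, hitems]
        rw [hkeys, hj]
        exact ih (d.insert letter i) (by rw [hsize]; simp [PySem.Dict.size, hitems]; omega)

-- ===== VERDICT (by name: the statement is the Claim_ definition above) =====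
theorem pref_ltof_spec : Claim_equal_pref_ltof := by
  unfold Claim_equal_pref_ltof
  intro word _
  unfold Spec_pref_ltof
  have hpw : ((pvFirstOcc (PySem.List.enumerate word) PySem.Dict.empty).items.map (·.2)).Pairwise (· < ·) :=
    pvValuesIncreasing word 0 PySem.Dict.empty (by simp [PySem.Dict.empty]) (by simp [PySem.Dict.empty])
  have halt : pref_ltof_alt word
      = match (pvFirstOcc (PySem.List.enumerate word) PySem.Dict.empty).items.getLast? with
        | none => (none, none)
        | some (letter, i) => (some (PySem.List.slice word none (some i)), some letter) := by
    unfold pref_ltof_alt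
    show (match PySem.List.max? (pvFirstOcc (PySem.List.enumerate word) PySem.Dict.empty).items (fun kv => kv.2) with
      | none => ((none : Option (List Int)), (none : Option Int))
      | some (letter, i) => (some (PySem.List.slice word none (some i)), some letter)) = _
    rw [pvMaxLast _ hpw]
  rw [halt]
  have h1 : (pvFirstOcc (PySem.List.enumerate word) PySem.Dict.empty).keys = pvCont word := by
    rw [pvKeysOfFold, PySem.List.map_snd_enumerate]
    rfl
  have hK : PySem.Set.len (pvCont word)
      = (((pvFirstOcc (PySem.List.enumerate word) PySem.Dict.empty).size : Nat) : Int) := by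
    show ((pvCont word).length : Int) = _
    rw [← h1]
    simp [PySem.Dict.keys, PySem.Dict.size]
  cases word with
  | nil => rfl
  | cons x xs =>
    have henum : PySem.List.enumerate (x :: xs) = (0, x) :: PySem.List.enumerate xs 1 := by
      rw [PySem.List.enumerate_cons]; norm_num
    have hF : pvFirstOcc (PySem.List.enumerate (x :: xs)) PySem.Dict.empty
        = pvFirstOcc (PySem.List.enumerate xs 1) (PySem.Dict.empty.insert x 0) := by
      rw [henum]; rfl
    have hlt : (PySem.Dict.empty : PySem.Dict Int Int).size
        < (pvFirstOcc (PySem.List.enumerate (x :: xs)) PySem.Dict.empty).size := by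
      rw [hF]
      obtain ⟨e, he⟩ := pvFirstOcc_prefix (PySem.List.enumerate xs 1) (PySem.Dict.empty.insert x 0)
      have hx : ((PySem.Dict.empty : PySem.Dict Int Int).insert x 0).items = [(x, 0)] := rfl
      rw [hx] at he
      simp [PySem.Dict.size, he]
      simp [PySem.Dict.empty]
    have hm := pvMain (x :: xs) (PySem.List.enumerate (x :: xs)) PySem.Dict.empty hlt
    unfold pref_ltof
    rw [hK]
    exact hm
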